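-- pv_equiv track=rewrite | github.com/gabox2002/programacion | 5.Funciones y listas/Ejercicio9_Biblioteca.py | listar_usuario_mas_joven
-- ===== SOURCE A (Python) =====
-- def listar_usuario_mas_joven(nombres, country, edades):
--     """
--     Recibe: nombres (list): Lista de nombres de usuarios.
--             edades (list): Lista de edades de usuarios.
--     Valida: No realiza validaciones en este caso.
--     Retorna: Lista de nombres de usuarios más jóvenes.
--     """
--     min_edad = edades[0]
--     usuarios_mas_jovenes = []
--
--     # Iterar sobre la lista de edades
--     for i in range(len(edades)):
--         # Verificar si la edad actual es menor que la edad mínima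
--         if edades[i] <= min_edad:
--             # Actualizar la edad mínima
--             min_edad = edades[i]
--             usuarios_mas_jovenes.append((nombres[i], country[i], edades[i])) # Limpiar la lista de personas más jóvenes y agregar la nueva persona más joven
--
--
--     return usuarios_mas_jovenes
-- ===== SOURCE B (Python) =====
-- def listar_usuario_mas_joven(nombres, country, edades):
--     # Pass 1: prefix-minimum array; Pass 2: select indices where the age equals it.
--     prefix = []
--     m = None
--     for e in edades:
--         m = e if m is None or e < m else m
--         prefix.append(m)
--     return [(nombres[i], country[i], edades[i])
--             for i in range(len(edades)) if edades[i] == prefix[i]]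
-- ===== Notes on version B (the rewrite author's own statement) =====
-- stated objective: alternative
-- what changed: B first builds the prefix-minimum array in one pass and then selects, in a separate comprehension, the indices whose age equals that prefix minimum, instead of A's single fused loop that mutates a running minimum and appends inside the branch.
import Mathlib
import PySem

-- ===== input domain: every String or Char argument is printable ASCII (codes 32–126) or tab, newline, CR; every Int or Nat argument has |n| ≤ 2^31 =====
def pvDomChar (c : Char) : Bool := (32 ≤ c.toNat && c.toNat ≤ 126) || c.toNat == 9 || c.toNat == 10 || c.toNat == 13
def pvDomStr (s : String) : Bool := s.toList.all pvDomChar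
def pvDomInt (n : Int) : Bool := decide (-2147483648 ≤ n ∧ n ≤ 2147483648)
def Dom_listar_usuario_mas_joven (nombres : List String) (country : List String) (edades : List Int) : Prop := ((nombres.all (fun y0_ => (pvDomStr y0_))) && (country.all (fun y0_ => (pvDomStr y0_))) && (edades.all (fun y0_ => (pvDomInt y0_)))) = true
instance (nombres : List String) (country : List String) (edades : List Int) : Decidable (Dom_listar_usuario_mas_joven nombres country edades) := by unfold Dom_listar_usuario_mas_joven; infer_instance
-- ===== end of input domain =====

-- B replaces A's fused running-minimum loop by a two-pass decomposition (prefix-minimum array, then a selecting comprehension); same asymptotic cost ("alternative").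

-- ===== PORT A =====
-- loop body of A's for-loop (state = (min_edad, usuarios_mas_jovenes)); indices come from
-- range(len(edades)), so they are in range for edades; the getD defaults are never read inside Pre_.
def pvStepA (nombres country : List String) (edades : List Int)
    (st : Int × List (String × String × Int)) (i : Nat) : Int × List (String × String × Int) :=
  if edades.getD i 0 ≤ st.1 then
    (edades.getD i 0, st.2 ++ [(nombres.getD i "", country.getD i "", edades.getD i 0)])
  else st

def listar_usuario_mas_joven (nombres : List String) (country : List String) (edades : List Int) : List (String × String × Int) :=
  match edades with
  | [] => []          -- Python raises IndexError at edades[0]; excluded by Pre_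
  | e0 :: _ =>
    ((List.range edades.length).foldl (pvStepA nombres country edades) (e0, [])).2

-- ===== PORT B =====
-- loop body of B's first pass: m = e if m is None or e < m else m; prefix.append(m)
def pvStepPrefix (st : Option Int × List Int) (e : Int) : Option Int × List Int :=
  let m : Int := match st.1 with
    | none => e
    | some m0 => if e < m0 then e else m0
  (some m, st.2 ++ [m])

def listar_usuario_mas_joven_alt (nombres : List String) (country : List String) (edades : List Int) : List (String × String × Int) :=
  let pref := (edades.foldl pvStepPrefix (none, [])).2
  (List.range edades.length).filterMap (fun i =>
    if edades.getD i 0 = pref.getD i 0 then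
      some (nombres.getD i "", country.getD i "", edades.getD i 0)
    else none)

-- ===== PRECONDITION & SPEC =====
-- Pre_ excludes exactly the inputs where Python A raises: empty edades (IndexError at edades[0]),
-- and inputs where some index at which the running-minimum branch fires (edades[i] ≤ every earlier age)
-- is out of range for nombres or country (IndexError there).
def Pre_listar_usuario_mas_joven (nombres : List String) (country : List String) (edades : List Int) : Prop :=
  edades ≠ [] ∧ ∀ i < edades.length,
    (∀ j < i, edades.getD i 0 ≤ edades.getD j 0) → (i < nombres.length ∧ i < country.length)

instance (nombres : List String) (country : List String) (edades : List Int) : Decidable (Pre_listar_usuario_mas_joven nombres country edades) := by unfold Pre_listar_usuario_mas_joven; infer_instance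

def pvWitness_listar_usuario_mas_joven : List String × List String × List Int :=
  (["ana", "bob", "eva"], ["ar", "uy", "cl"], [30, 25, 27])

def Spec_listar_usuario_mas_joven (nombres : List String) (country : List String) (edades : List Int) (out : List (String × String × Int)) : Prop := out = listar_usuario_mas_joven_alt nombres country edades
instance (nombres : List String) (country : List String) (edades : List Int) (out : List (String × String × Int)) : Decidable (Spec_listar_usuario_mas_joven nombres country edades out) := by unfold Spec_listar_usuario_mas_joven; infer_instance

-- ===== CLAIM (what is proved, stated in full; the proofs are below) =====
def Claim_equal_listar_usuario_mas_joven : Prop := ∀ (nombres : List String) (country : List String) (edades : List Int), Dom_listar_usuario_mas_joven nombres country edades → Pre_listar_usuario_mas_joven nombres country edades → Spec_listar_usuario_mas_joven nombres country edades (listar_usuario_mas_joven nombres country edades)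

-- ===== LEMMAS AND PROOFS =====

-- min of e and the first i elements of l (running minimum of A after i iterations, with e = edades[0])
def pvPmin (e : Int) (l : List Int) : Int := l.foldl min e

-- the sequence of prefix minima produced by B's first pass after the head
def pvMins (m : Int) : List Int → List Int
  | [] => []
  | e :: t => min m e :: pvMins (min m e) t

lemma pv_if_min (m e : Int) : (if e < m then e else m) = min m e := by
  rw [min_def]; split_ifs <;> omega

lemma pv_prefix_eq (l : List Int) : ∀ (m : Int) (acc : List Int),
    (l.foldl pvStepPrefix (some m, acc)).2 = acc ++ pvMins m l := by
  induction l with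
  | nil => intro m acc; simp [pvMins]
  | cons e t ih =>
    intro m acc
    simp only [List.foldl_cons, pvStepPrefix, pvMins, pv_if_min, ih, List.append_assoc,
      List.singleton_append]

lemma pv_mins_getD (l : List Int) : ∀ (m : Int) (i : Nat), i < l.length →
    (pvMins m l).getD i 0 = pvPmin m (l.take (i + 1)) := by
  induction l with
  | nil => intro m i h; simp at h
  | cons e t ih =>
    intro m i h
    cases i with
    | zero => simp [pvMins, pvPmin]
    | succ j =>
      simp only [pvMins, List.getD_cons_succ, List.take_succ_cons]
      rw [ih (min m e) j (by simpa using h)]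
      simp [pvPmin]

lemma pv_take_succ_of_lt (l : List Int) (n : Nat) (h : n < l.length) :
    l.take (n + 1) = l.take n ++ [l.getD n 0] := by
  rw [List.take_add_one, List.getElem?_eq_getElem h, List.getD_eq_getElem _ _ h]
  rfl

lemma pv_foldA_spec (nombres country : List String) (e0 : Int) (rest : List Int) :
    ∀ n, n ≤ (e0 :: rest).length → ∀ acc,
    (List.range n).foldl (pvStepA nombres country (e0 :: rest)) (e0, acc) =
      (pvPmin e0 ((e0 :: rest).take n),
       acc ++ (List.range n).filterMap (fun i =>
         if (e0 :: rest).getD i 0 ≤ pvPmin e0 ((e0 :: rest).take i) then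
           some (nombres.getD i "", country.getD i "", (e0 :: rest).getD i 0)
         else none)) := by
  intro n
  induction n with
  | zero => intro _ acc; simp [pvPmin]
  | succ n ih =>
    intro hn acc
    have hn' : n < (e0 :: rest).length := Nat.lt_of_succ_le hn
    rw [List.range_succ, List.foldl_append, ih (Nat.le_of_lt hn'), List.filterMap_append,
      pv_take_succ_of_lt _ n hn']
    simp only [List.foldl_cons, List.foldl_nil, List.filterMap_cons, List.filterMap_nil, pvStepA]
    have hmin : pvPmin e0 ((e0 :: rest).take n ++ [(e0 :: rest).getD n 0])
        = min (pvPmin e0 ((e0 :: rest).take n)) ((e0 :: rest).getD n 0) := by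
      simp [pvPmin, List.foldl_append]
    by_cases hc : (e0 :: rest).getD n 0 ≤ pvPmin e0 ((e0 :: rest).take n)
    · rw [if_pos hc, if_pos hc, hmin, min_eq_right hc, Prod.mk.injEq]
      exact ⟨rfl, by simp⟩
    · rw [if_neg hc, if_neg hc, hmin, min_eq_left (le_of_not_ge hc), Prod.mk.injEq]
      exact ⟨rfl, by simp⟩
  -- (running minimum after n steps = prefix minimum; the branch fires iff the age ≤ it)

lemma pv_cond_iff (e0 : Int) (rest : List Int) (i : Nat) (h : i < (e0 :: rest).length) :
    ((e0 :: rest).getD i 0 = ([e0] ++ pvMins e0 rest).getD i 0) ↔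
    ((e0 :: rest).getD i 0 ≤ pvPmin e0 ((e0 :: rest).take i)) := by
  cases i with
  | zero => simp [pvPmin]
  | succ j =>
    have hj : j < rest.length := by simpa using h
    have h1 : ([e0] ++ pvMins e0 rest).getD (j + 1) 0 = pvPmin e0 (rest.take (j + 1)) := by
      simpa using pv_mins_getD rest e0 j hj
    have h2 : pvPmin e0 ((e0 :: rest).take (j + 1)) = pvPmin e0 (rest.take j) := by
      simp [pvPmin, List.take_succ_cons]
    have h3 : pvPmin e0 (rest.take (j + 1)) = min (pvPmin e0 (rest.take j)) (rest.getD j 0) := by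
      rw [pv_take_succ_of_lt rest j hj]; simp [pvPmin]
    rw [h1, h2, h3, List.getD_cons_succ]
    constructor
    · intro he; rw [he]; exact min_le_left _ _
    · intro he; exact (min_eq_right he).symm

theorem pv_main (nombres country : List String) (edades : List Int) (hne : edades ≠ []) :
    listar_usuario_mas_joven nombres country edades =
    listar_usuario_mas_joven_alt nombres country edades := by
  match edades, hne with
  | e0 :: rest, _ =>
    have hp : ((e0 :: rest).foldl pvStepPrefix (none, [])).2 = [e0] ++ pvMins e0 rest := by
      have : (e0 :: rest).foldl pvStepPrefix (none, []) =
          rest.foldl pvStepPrefix (some e0, [e0]) := by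
        simp [pvStepPrefix]
      rw [this, pv_prefix_eq]
    show ((List.range (e0 :: rest).length).foldl (pvStepA nombres country (e0 :: rest)) (e0, [])).2 = _
    rw [pv_foldA_spec nombres country e0 rest (e0 :: rest).length (le_refl _) []]
    simp only [listar_usuario_mas_joven_alt, hp, List.nil_append]
    apply List.filterMap_congr
    intro i hi
    have hi' : i < (e0 :: rest).length := List.mem_range.mp hi
    exact if_congr (pv_cond_iff e0 rest i hi').symm rfl rfl

-- ===== VERDICT (by name: the statement is the Claim_ definition above) =====
theorem listar_usuario_mas_joven_spec : Claim_equal_listar_usuario_mas_joven := by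
  intro nombres country edades _ hpre
  exact pv_main nombres country edades hpre.1
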